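-- pv_equiv track=rewrite | github.com/Morpheus-xz/MindGuard | src/keyword_engine.py | calculate_overall_severity
-- ===== SOURCE A (Python) =====
-- from typing import Dict, List, Optional, Set, Tuple
--
-- def calculate_overall_severity(indicators: List[Dict]) -> str:
--     """
--     Calculate overall severity from all indicators.
--
--     Args:
--         indicators: List of detected indicators.
--
--     Returns:
--         Overall severity: Low, Medium, or High.
--     """
--     if not indicators:
--         return "Low"
--
--     # If any High severity indicator, return High
--     if any(ind["severity"] == "High" for ind in indicators):
--         return "High"
--
--     # If any critical category detected
--     critical_categories = {"suicidal_ideation"}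
--     if any(ind["indicator_type"] in critical_categories for ind in indicators):
--         return "High"
--
--     # Count severity levels
--     medium_count = sum(1 for ind in indicators if ind["severity"] == "Medium")
--
--     # Multiple medium indicators escalate to High
--     if medium_count >= 3:
--         return "High"
--     elif medium_count >= 1:
--         return "Medium"
--
--     # Multiple low indicators can escalate to Medium
--     if len(indicators) >= 4:
--         return "Medium"
--
--     return "Low"
-- ===== SOURCE B (Python) =====
-- def calculate_overall_severity(indicators):
--     """Single fused pass: early-return on High, accumulate medium count and critical flag."""
--     medium_count = 0
--     critical = False
--     for ind in indicators:
--         if ind["severity"] == "High":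
--             return "High"
--         if ind["severity"] == "Medium":
--             medium_count += 1
--         if ind["indicator_type"] == "suicidal_ideation":
--             critical = True
--     if critical or medium_count >= 3:
--         return "High"
--     if medium_count >= 1 or len(indicators) >= 4:
--         return "Medium"
--     return "Low"
-- ===== Notes on version B (the rewrite author's own statement) =====
-- stated objective: alternative
-- what changed: Replaces A's four separate scans (two any-scans, a medium count, a length check cascade) by one fused loop that early-returns on the first High and accumulates the medium count and critical flag, followed by a single post-loop cascade.
-- outside the precondition, e.g. on calculate_overall_severity([{'severity': 'Low'}, {'severity': 'High'}]): A returns 'High', B raises KeyError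
import Mathlib
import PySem

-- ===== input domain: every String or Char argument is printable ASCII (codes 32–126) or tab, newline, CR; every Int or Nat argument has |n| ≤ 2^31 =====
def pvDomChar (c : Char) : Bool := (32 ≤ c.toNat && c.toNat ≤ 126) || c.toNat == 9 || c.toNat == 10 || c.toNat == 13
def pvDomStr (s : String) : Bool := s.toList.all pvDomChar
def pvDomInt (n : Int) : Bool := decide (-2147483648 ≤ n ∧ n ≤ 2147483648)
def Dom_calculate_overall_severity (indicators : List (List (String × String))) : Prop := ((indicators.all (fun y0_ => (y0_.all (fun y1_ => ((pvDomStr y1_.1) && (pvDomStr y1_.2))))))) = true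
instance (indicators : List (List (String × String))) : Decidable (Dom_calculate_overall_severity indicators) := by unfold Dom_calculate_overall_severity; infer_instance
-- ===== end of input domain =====

-- B fuses A's four scans into one early-returning loop; same return value everywhere on Pre_.

-- ===== PORT A =====
-- dict lookup (first match, as an assoc list); Pre_ guarantees the key is present,
-- so the "" default is never taken on admitted inputs (Python raises KeyError there).
def pvGetKey (ind : List (String × String)) (k : String) : String :=
  ((ind.find? (fun p => p.1 == k)).map Prod.snd).getD ""

def calculate_overall_severity (indicators : List (List (String × String))) : String :=
  if indicators = [] then "Low"
  else if indicators.any (fun ind => pvGetKey ind "severity" == "High") then "High"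
  else if indicators.any (fun ind => pvGetKey ind "indicator_type" == "suicidal_ideation") then "High"
  else
    let medium_count : Int := (indicators.countP (fun ind => pvGetKey ind "severity" == "Medium") : Int)
    if medium_count ≥ 3 then "High"
    else if medium_count ≥ 1 then "Medium"
    else if (indicators.length : Int) ≥ 4 then "Medium"
    else "Low"

-- ===== PORT B =====
-- the fused loop: none = early "High" return, some (mc, crit) = state after the loop
def pvBLoop : List (List (String × String)) → Int → Bool → Option (Int × Bool)
  | [], mc, crit => some (mc, crit)
  | ind :: rest, mc, crit =>
      if pvGetKey ind "severity" == "High" then none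
      else pvBLoop rest (if pvGetKey ind "severity" == "Medium" then mc + 1 else mc)
                        (crit || (pvGetKey ind "indicator_type" == "suicidal_ideation"))

def calculate_overall_severity_alt (indicators : List (List (String × String))) : String :=
  match pvBLoop indicators 0 false with
  | none => "High"
  | some (mc, crit) =>
    if crit || mc ≥ 3 then "High"
    else if mc ≥ 1 || (indicators.length : Int) ≥ 4 then "Medium"
    else "Low"

-- ===== PRECONDITION & SPEC =====
-- Pre_ excludes duplicate keys (unrepresentable in a Python dict) and inputs on which a
-- missing "severity"/"indicator_type" key makes A or B raise KeyError: every indicator before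
-- the first High-severity one must carry both keys (past the first High neither program reads anything).
def Pre_calculate_overall_severity (indicators : List (List (String × String))) : Prop :=
  (∀ ind ∈ indicators, (ind.map Prod.fst).Nodup) ∧
  (∀ ind ∈ indicators.takeWhile (fun ind => !(pvGetKey ind "severity" == "High")),
    "severity" ∈ ind.map Prod.fst ∧ "indicator_type" ∈ ind.map Prod.fst)
instance (indicators : List (List (String × String))) : Decidable (Pre_calculate_overall_severity indicators) := by unfold Pre_calculate_overall_severity; infer_instance
def pvWitness_calculate_overall_severity : (List (List (String × String))) :=
  [[("severity", "Medium"), ("indicator_type", "anxiety")]]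

def Spec_calculate_overall_severity (indicators : List (List (String × String))) (out : String) : Prop := out = calculate_overall_severity_alt indicators
instance (indicators : List (List (String × String))) (out : String) : Decidable (Spec_calculate_overall_severity indicators out) := by unfold Spec_calculate_overall_severity; infer_instance

-- ===== CLAIM (what is proved, stated in full; the proofs are below) =====
def Claim_equal_calculate_overall_severity : Prop := ∀ (indicators : List (List (String × String))), Dom_calculate_overall_severity indicators → Pre_calculate_overall_severity indicators → Spec_calculate_overall_severity indicators (calculate_overall_severity indicators)

-- ===== LEMMAS AND PROOFS =====

-- characterisation of the fused loop in terms of A's separate scans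
theorem pvBLoop_char (l : List (List (String × String))) (mc : Int) (crit : Bool) :
    pvBLoop l mc crit =
      (if l.any (fun ind => pvGetKey ind "severity" == "High") then none
       else some (mc + (l.countP (fun ind => pvGetKey ind "severity" == "Medium") : Int),
                  crit || l.any (fun ind => pvGetKey ind "indicator_type" == "suicidal_ideation"))) := by
  induction l generalizing mc crit with
  | nil => simp [pvBLoop]
  | cons ind rest ih =>
      simp only [pvBLoop, List.any_cons, List.countP_cons]
      by_cases hH : pvGetKey ind "severity" == "High"
      · simp [hH]
      · rw [if_neg (by simp [hH]), ih]
        by_cases hM : pvGetKey ind "severity" == "Medium" <;>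
          by_cases hC : pvGetKey ind "indicator_type" == "suicidal_ideation" <;>
            simp [hH, hM, hC] <;> split_ifs <;> ring_nf

-- ===== VERDICT (by name: the statement is the Claim_ definition above) =====
theorem calculate_overall_severity_spec : Claim_equal_calculate_overall_severity := by
  intro indicators _ _
  unfold Spec_calculate_overall_severity calculate_overall_severity calculate_overall_severity_alt
  rw [pvBLoop_char]
  rcases indicators with _ | ⟨ind, rest⟩
  · simp
  · by_cases hH : (ind :: rest).any (fun i => pvGetKey i "severity" == "High")
    · simp [hH]
    · by_cases hC : (ind :: rest).any (fun i => pvGetKey i "indicator_type" == "suicidal_ideation")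
      · simp [hH, hC]
      · simp only [hH, hC, if_false, Bool.or_false, zero_add, reduceCtorEq]
        split_ifs <;> simp only [Bool.or_eq_true, decide_eq_true_eq, Bool.false_or, not_or, not_le] at * <;> first | rfl | omega
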